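-- pv_equiv track=rewrite | github.com/cam4ani/UTILS | utils.py | all_except_keys
-- ===== SOURCE A (Python) =====
-- def all_except_keys(dico,li_ke):
--     r = []
--     dico_ = dico.copy()
--     for k in li_ke:
--         dico_.pop(k,None)
--     r = list(dico_.values())
--     r = [i for sublist in r for i in sublist]
--     return(set(r))
-- ===== SOURCE B (Python) =====
-- def all_except_keys(dico, li_ke):
--     excl = set(li_ke)
--     acc = set()
--     for k, v in dico.items():
--         if k not in excl:
--             acc.update(v)
--     return acc
-- ===== Notes on version B (the rewrite author's own statement) =====
-- stated objective: simpler
-- what changed: Replaces A's staged passes (dict copy, pop loop over excluded keys, values list, flatten list, set() at the end) by a single pass over the items that skips excluded keys and grows the result set incrementally with update; no dict copy or intermediate lists exist.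
import Mathlib
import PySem

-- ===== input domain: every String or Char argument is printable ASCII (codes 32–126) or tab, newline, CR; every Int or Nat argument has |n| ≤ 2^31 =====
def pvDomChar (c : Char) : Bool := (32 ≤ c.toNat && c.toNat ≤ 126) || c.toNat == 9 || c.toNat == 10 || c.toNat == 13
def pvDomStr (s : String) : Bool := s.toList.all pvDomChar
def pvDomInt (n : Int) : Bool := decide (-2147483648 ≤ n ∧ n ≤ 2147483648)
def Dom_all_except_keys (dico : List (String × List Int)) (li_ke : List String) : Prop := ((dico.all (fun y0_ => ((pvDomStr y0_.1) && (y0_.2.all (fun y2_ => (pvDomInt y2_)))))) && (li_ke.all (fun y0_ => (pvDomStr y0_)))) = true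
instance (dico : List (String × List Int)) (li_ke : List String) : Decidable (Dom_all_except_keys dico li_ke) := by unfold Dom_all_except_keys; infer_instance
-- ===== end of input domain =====

-- B replaces A's staged passes (dict copy, pop loop, values list, flatten list, final set())
-- by one pass over the items that skips excluded keys and grows the result set incrementally (objective: simpler).

-- ===== PORT A =====
-- r = []; dico_ = dico.copy(); for k in li_ke: dico_.pop(k, None);
-- r = list(dico_.values()); r = [i for sublist in r for i in sublist]; return set(r)
def all_except_keys (dico : List (String × List Int)) (li_ke : List String) : List Int :=
  let dico_ := li_ke.foldl (fun d k => d.erase k) (PySem.Dict.ofList dico)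
  let r := dico_.values
  let r := r.flatMap (fun sublist => sublist)
  PySem.Set.ofList r

-- ===== PORT B =====
-- excl = set(li_ke); acc = set(); for k, v in dico.items(): if k not in excl: acc.update(v); return acc
def all_except_keys_alt (dico : List (String × List Int)) (li_ke : List String) : List Int :=
  let excl := PySem.Set.ofList li_ke
  (PySem.Dict.ofList dico).items.foldl
    (fun acc kv => if !(excl.contains kv.1) then PySem.Set.update acc kv.2 else acc)
    PySem.Set.empty

-- ===== PRECONDITION & SPEC =====
def Spec_all_except_keys (dico : List (String × List Int)) (li_ke : List String) (out : List Int) : Prop := out = all_except_keys_alt dico li_ke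
instance (dico : List (String × List Int)) (li_ke : List String) (out : List Int) : Decidable (Spec_all_except_keys dico li_ke out) := by unfold Spec_all_except_keys; infer_instance

-- ===== CLAIM (what is proved, stated in full; the proofs are below) =====
def Claim_equal_all_except_keys : Prop := ∀ (dico : List (String × List Int)) (li_ke : List String), Dom_all_except_keys dico li_ke → Spec_all_except_keys dico li_ke (all_except_keys dico li_ke)

-- ===== LEMMAS AND PROOFS =====

-- Folding `erase` over a key list filters the items down to the keys not in the list.
theorem items_foldl_erase {κ ν : Type} [BEq κ] (li : List κ) (d : PySem.Dict κ ν) :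
    (li.foldl (fun d k => d.erase k) d).items
      = d.items.filter (fun p => !(li.contains p.1)) := by
  induction li generalizing d with
  | nil => simp
  | cons k li ih =>
      rw [List.foldl_cons, ih]
      simp only [PySem.Dict.erase, List.filter_filter]
      apply List.filter_congr
      intro p _
      cases h : p.1 == k <;> simp [List.contains_cons, h]

-- A Set built from a list contains exactly the list's elements.
theorem set_ofList_contains {α : Type} [BEq α] [LawfulBEq α] (xs : List α) (a : α) :
    (PySem.Set.ofList xs).contains a = xs.contains a := by
  simp [PySem.Set.contains, PySem.Set.mem_ofList]

-- B's one-pass filtered fold equals updating the accumulator with the filtered flatten.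
theorem foldl_update_filter {κ : Type} (p : κ → Bool)
    (items : List (κ × List Int)) (acc : PySem.Set Int) :
    items.foldl (fun acc kv => if p kv.1 then PySem.Set.update acc kv.2 else acc) acc
      = PySem.Set.update acc ((items.filter (fun kv => p kv.1)).flatMap (fun kv => kv.2)) := by
  induction items generalizing acc with
  | nil => simp [PySem.Set.update]
  | cons kv items ih =>
      rw [List.foldl_cons, ih]
      by_cases h : p kv.1 = true
      · simp [h, PySem.Set.update, List.foldl_append]
      · simp [h]

-- ===== VERDICT (by name: the statement is the Claim_ definition above) =====
theorem all_except_keys_spec : Claim_equal_all_except_keys := by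
  intro dico li_ke _
  unfold Spec_all_except_keys all_except_keys all_except_keys_alt
  dsimp only
  rw [foldl_update_filter (fun k => !(PySem.Set.ofList li_ke).contains k)]
  simp only [items_foldl_erase, PySem.Dict.values, List.flatMap_def, List.map_map]
  have h0 : ∀ xs : List Int, PySem.Set.update PySem.Set.empty xs = PySem.Set.ofList xs := by
    intro xs; rw [PySem.Set.ofList_eq_foldl]; rfl
  rw [h0]
  simp only [Function.comp_def, set_ofList_contains]
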